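-- pv_equiv track=rewrite | github.com/Christopher-Cannon/jewel-match | jewel-match.py | drop_jewels
-- ===== SOURCE A (Python) =====
-- def drop_jewels(playfield):
--     for y in range(len(playfield)):
--         for x in range(len(playfield[y])):
--             if(playfield[y][x] == ' '):
--                 if(y > 0):
--                     pos = y
--                     # Move jewels down and empty space up
--                     while(pos > 0):
--                         playfield[pos][x], playfield[pos - 1][x] = playfield[pos - 1][x], playfield[pos][x]
--
--                         pos -= 1
--                 else:
--                     pass
--             else:
--                 pass
--
--     return playfield
-- ===== SOURCE B (Python) =====
-- def drop_jewels(playfield):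
--     # Per-column single pass: find the lowest empty cell, then rebuild that
--     # column prefix as empties on top followed by the jewels in order.
--     width = max(map(len, playfield), default=0)
--     for x in range(width):
--         lowest = None
--         for y in range(len(playfield)):
--             if x < len(playfield[y]) and playfield[y][x] == ' ':
--                 lowest = y
--         if lowest is None:
--             continue
--         col = [playfield[y][x] for y in range(lowest + 1)]
--         solid = [c for c in col if c != ' ']
--         newcol = [' '] * (lowest + 1 - len(solid)) + solid
--         for y in range(lowest + 1):
--             playfield[y][x] = newcol[y]
--     return playfield
-- ===== Notes on version B (the rewrite author's own statement) =====
-- stated objective: alternative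
-- what changed: Instead of bubbling each empty cell to the top with a chain of adjacent swaps cell by cell, B works column by column: it finds the lowest empty cell of the column, then rewrites that column prefix as empties on top followed by the non-empty cells in order.
import Mathlib
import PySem

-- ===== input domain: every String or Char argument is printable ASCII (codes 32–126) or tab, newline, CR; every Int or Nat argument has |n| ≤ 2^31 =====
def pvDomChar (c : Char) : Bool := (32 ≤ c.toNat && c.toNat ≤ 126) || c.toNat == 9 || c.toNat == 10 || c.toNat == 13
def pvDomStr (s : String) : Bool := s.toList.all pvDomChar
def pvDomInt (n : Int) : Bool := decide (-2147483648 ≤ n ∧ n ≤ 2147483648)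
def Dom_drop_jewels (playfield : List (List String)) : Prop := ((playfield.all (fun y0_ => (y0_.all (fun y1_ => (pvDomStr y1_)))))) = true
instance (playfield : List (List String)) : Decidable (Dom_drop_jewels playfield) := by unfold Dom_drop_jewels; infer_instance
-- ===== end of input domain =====

-- B replaces A's per-cell bubbling (adjacent swaps) by one pass per column; both mutate
-- the argument in place in Python, and B performs the same net mutation as A.

-- playfield[y][x] (in range wherever the Pythons read, under Pre_)
def pvGet (g : List (List String)) (y x : Nat) : String := (g.getD y []).getD x ""
-- playfield[y][x] = v (no-op out of range; in range wherever the Pythons write, under Pre_)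
def pvSet (g : List (List String)) (y x : Nat) (v : String) : List (List String) :=
  g.modify y (fun r => r.set x v)

-- ===== PORT A =====
-- while(pos > 0): swap playfield[pos][x], playfield[pos-1][x]; pos -= 1
def pvBubble (x : Nat) : Nat → List (List String) → List (List String)
  | 0, g => g
  | p + 1, g =>
    let a := pvGet g p x
    let b := pvGet g (p + 1) x
    pvBubble x p (pvSet (pvSet g (p + 1) x a) p x b)

-- body of the inner loop at cell (y, x)
def pvRowStep (g : List (List String)) (y x : Nat) : List (List String) :=
  if pvGet g y x = " " then (if 0 < y then pvBubble x y g else g) else g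

-- for x in range(len(playfield[y])): …
def pvProcessRow (g : List (List String)) (y : Nat) : List (List String) :=
  (List.range (g.getD y []).length).foldl (fun g' x => pvRowStep g' y x) g

def drop_jewels (playfield : List (List String)) : List (List String) :=
  (List.range playfield.length).foldl pvProcessRow playfield

-- ===== PORT B =====
-- lowest: last y with x < len(playfield[y]) and playfield[y][x] == ' '
def pvFindLowest (g : List (List String)) (x : Nat) : Option Nat :=
  (List.range g.length).foldl
    (fun acc y => if x < (g.getD y []).length ∧ (g.getD y []).getD x "" = " " then some y else acc)
    none

-- body of the loop over columns
def pvColStep (g : List (List String)) (x : Nat) : List (List String) :=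
  match pvFindLowest g x with
  | none => g
  | some lo =>
    let col := (List.range (lo + 1)).map (fun y => pvGet g y x)
    let solid := col.filter (fun c => c ≠ " ")
    let newcol := List.replicate (lo + 1 - solid.length) " " ++ solid
    (List.range (lo + 1)).foldl (fun g' y => pvSet g' y x (newcol.getD y "")) g

def drop_jewels_alt (playfield : List (List String)) : List (List String) :=
  let width := (playfield.map List.length).foldl Nat.max 0
  (List.range width).foldl pvColStep playfield

-- ===== PRECONDITION & SPEC =====
-- Pre_ is exactly where A returns: every empty cell has all rows above it long enough
-- (otherwise A's swap chain indexes a too-short upper row and raises IndexError).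
def Pre_drop_jewels (playfield : List (List String)) : Prop :=
  ∀ y < playfield.length, ∀ x < (playfield.getD y []).length,
    (playfield.getD y []).getD x "" = " " → ∀ y' < y, x < (playfield.getD y' []).length
instance (playfield : List (List String)) : Decidable (Pre_drop_jewels playfield) := by
  unfold Pre_drop_jewels; infer_instance

def pvWitness_drop_jewels : List (List String) := [["a", " "], [" ", "b"], ["c", "d"]]

def Spec_drop_jewels (playfield : List (List String)) (out : List (List String)) : Prop :=
  out = drop_jewels_alt playfield
instance (playfield : List (List String)) (out : List (List String)) :
    Decidable (Spec_drop_jewels playfield out) := by unfold Spec_drop_jewels; infer_instance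

-- ===== CLAIM (what is proved, stated in full; the proofs are below) =====
def Claim_equal_drop_jewels : Prop :=
  ∀ (playfield : List (List String)), Dom_drop_jewels playfield →
    Pre_drop_jewels playfield → Spec_drop_jewels playfield (drop_jewels playfield)

-- ===== LEMMAS AND PROOFS =====

-- column x of the grid, padded with "" where a row is shorter
def colAt (x : Nat) (g : List (List String)) : List String := g.map (fun r => r.getD x "")

-- the common closed form: after processing rows < k, a column holds its spaces among the
-- first k cells on top, then its non-spaces among the first k cells in order, then the rest
def grav (k : Nat) (c : List String) : List String :=
  List.replicate ((c.take k).count " ") " " ++ ((c.take k).filter (fun s => s ≠ " ") ++ c.drop k)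

-- same length and same row lengths
def pvShape (g g' : List (List String)) : Prop :=
  g'.length = g.length ∧ ∀ y, ((g'.getD y []).length = (g.getD y []).length)

theorem pvShape_refl (g : List (List String)) : pvShape g g := ⟨rfl, fun _ => rfl⟩

theorem pvShape_trans {g₀ g₁ g₂ : List (List String)} (h1 : pvShape g₀ g₁) (h2 : pvShape g₁ g₂) :
    pvShape g₀ g₂ := ⟨h2.1.trans h1.1, fun y => (h2.2 y).trans (h1.2 y)⟩

theorem length_colAt (x : Nat) (g : List (List String)) : (colAt x g).length = g.length := by
  simp [colAt]

theorem getD_colAt (x y : Nat) (g : List (List String)) :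
    (colAt x g).getD y "" = pvGet g y x := by
  simp only [colAt, pvGet, List.getD_eq_getElem?_getD, List.getElem?_map]
  cases g[y]? <;> simp

theorem pvShape_pvSet (g : List (List String)) (y x : Nat) (v : String) :
    pvShape g (pvSet g y x v) := by
  constructor
  · simp [pvSet, List.length_modify]
  · intro y'
    simp only [pvSet, List.getD_eq_getElem?_getD, List.getElem?_modify]
    cases g[y']? <;> simp <;> split <;> simp

theorem colAt_pvSet_self (g : List (List String)) (y x : Nat) (v : String)
    (hy : y < g.length) (hx : x < (g.getD y []).length) :
    colAt x (pvSet g y x v) = (colAt x g).set y v := by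
  apply List.ext_getElem?
  intro j
  simp only [colAt, pvSet, List.getElem?_map, List.getElem?_modify, List.getElem?_set]
  by_cases hj : y = j
  · subst hj
    have h1 : g[y]? = some g[y] := List.getElem?_eq_getElem hy
    rw [h1]
    rw [List.getD_eq_getElem?_getD, List.getElem?_eq_getElem hy] at hx
    simp only [Option.getD_some] at hx
    simp [List.getD_eq_getElem?_getD, List.getElem?_set, hx, hy]
  · simp [hj]

theorem colAt_pvSet_ne (g : List (List String)) (y x x' : Nat) (v : String) (h : x' ≠ x) :
    colAt x' (pvSet g y x v) = colAt x' g := by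
  apply List.ext_getElem?
  intro j
  simp only [colAt, List.getElem?_map, pvSet, List.getElem?_modify]
  cases g[j]? <;> simp
  split <;> simp [List.getD_eq_getElem?_getD, List.getElem?_set, Ne.symm h]

theorem length_RF (k : Nat) (c : List String) :
    (c.take k).count " " + ((c.take k).filter (fun s => s ≠ " ")).length = (c.take k).length := by
  have h := List.length_eq_countP_add_countP (l := c.take k) (p := fun s => s == " ")
  have e1 : ((c.take k).filter (fun s => s ≠ " ")).length
      = List.countP (fun a => decide ¬((a == " ") = true)) (c.take k) := by
    rw [← List.countP_eq_length_filter]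
    apply List.countP_congr; intro a _; simp
  rw [List.count_eq_countP, e1]
  omega

theorem take_elem_drop (k : Nat) (c : List String) (hk : k < c.length) :
    c.take (k+1) = c.take k ++ [c.getD k ""] ∧ c.drop k = c.getD k "" :: c.drop (k+1) := by
  induction k generalizing c with
  | zero => cases c with
    | nil => simp at hk
    | cons a t => simp
  | succ n ih => cases c with
    | nil => simp at hk
    | cons a t =>
      have := ih t (by simpa using hk)
      constructor
      · simpa using this.1
      · simpa using this.2

theorem getD_grav_ge (k y : Nat) (c : List String) (h : k ≤ y) :
    (grav k c).getD y "" = c.getD y "" := by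
  by_cases hk : k ≤ c.length
  · have hlen : ((List.replicate ((c.take k).count " ") " ") ++ (c.take k).filter (fun s => s ≠ " ")).length = k := by
      have := length_RF k c
      simp only [List.length_append, List.length_replicate, List.length_take] at *
      omega
    have hassoc : grav k c = ((List.replicate ((c.take k).count " ") " ") ++ (c.take k).filter (fun s => s ≠ " ")) ++ c.drop k := by
      rw [grav, List.append_assoc]
    rw [hassoc, List.getD_eq_getElem?_getD, List.getD_eq_getElem?_getD]
    rw [List.getElem?_append_right (by omega)]
    rw [hlen, List.getElem?_drop]
    congr 2
    omega
  · push_neg at hk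
    have h1 : c.take k = c := List.take_of_length_le (by omega)
    have h2 : c.drop k = [] := List.drop_of_length_le (by omega)
    have hRF := length_RF k c
    rw [h1] at hRF
    rw [grav, h1, h2, List.getD_eq_getElem?_getD, List.getD_eq_getElem?_getD]
    rw [List.getElem?_eq_none (by simp only [List.append_nil, List.length_append, List.length_replicate]; omega)]
    rw [List.getElem?_eq_none (by omega)]

theorem grav_succ_nonspace (k : Nat) (c : List String) (h : c.getD k "" ≠ " ") :
    grav (k + 1) c = grav k c := by
  by_cases hk : k < c.length
  · obtain ⟨htake, hdrop⟩ := take_elem_drop k c hk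
    have h' : (getElem? c k).getD "" ≠ " " := by rwa [List.getD_eq_getElem?_getD] at h
    rw [grav, grav, htake, hdrop]
    simp [List.count_append, List.filter_append, h']
  · push_neg at hk
    have h1 : c.take (k+1) = c.take k := by
      rw [List.take_of_length_le (by omega), List.take_of_length_le (by omega)]
    have h2 : c.drop (k+1) = c.drop k := by
      rw [List.drop_of_length_le (by omega), List.drop_of_length_le (by omega)]
    rw [grav, grav, h1, h2]

theorem grav_one_space (c : List String) (h : c.getD 0 "" = " ") : grav 1 c = c := by
  cases c with
  | nil => simp at h
  | cons c0 t =>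
    simp only [List.getD_cons_zero] at h
    subst h
    simp [grav]

theorem grav_succ_space (k : Nat) (c : List String) (hk : k < c.length)
    (h : c.getD k "" = " ") :
    grav (k + 1) c =
      (grav k c).getD k "" :: ((grav k c).take k ++ (grav k c).drop (k + 1)) := by
  have hlen : ((List.replicate ((c.take k).count " ") " ") ++ (c.take k).filter (fun s => s ≠ " ")).length = k := by
    have := length_RF k c
    simp only [List.length_append, List.length_replicate, List.length_take] at *
    omega
  obtain ⟨htake, hdrop⟩ := take_elem_drop k c hk
  rw [h] at htake hdrop
  have hgk : grav k c = ((List.replicate ((c.take k).count " ") " ") ++ (c.take k).filter (fun s => s ≠ " ")) ++ c.drop k := by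
    rw [grav, List.append_assoc]
  have hgetg : (grav k c).getD k "" = " " := by
    rw [getD_grav_ge k k c le_rfl, h]
  have htk : (grav k c).take k = (List.replicate ((c.take k).count " ") " ") ++ (c.take k).filter (fun s => s ≠ " ") := by
    rw [hgk, List.take_append_of_le_length (by omega), List.take_of_length_le (by omega)]
  have hdk : (grav k c).drop (k+1) = c.drop (k+1) := by
    have hsplit : k + 1 = ((List.replicate ((c.take k).count " ") " ") ++ (c.take k).filter (fun s => s ≠ " ")).length + 1 := by omega
    rw [hgk, hdrop, hsplit, List.drop_length_add_append]
    simp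
  rw [hgetg, htk, hdk]
  rw [grav, htake]
  simp only [List.count_append, List.filter_append]
  simp [List.replicate_succ]

theorem grav_eq_self_of_no_space (c : List String) (h : ∀ y < c.length, c.getD y "" ≠ " ") :
    grav c.length c = c := by
  have hmem : ∀ s ∈ c, s ≠ " " := by
    intro s hs
    obtain ⟨y, hy, rfl⟩ := List.mem_iff_getElem.mp hs
    have := h y hy
    rwa [List.getD_eq_getElem?_getD, List.getElem?_eq_getElem hy] at this
  have hcount : c.count " " = 0 := by
    rw [List.count_eq_zero]
    intro hmem'
    exact hmem _ hmem' rfl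
  have hfilter : c.filter (fun s => s ≠ " ") = c := by
    rw [List.filter_eq_self]
    intro a ha; simpa using hmem a ha
  simp only [grav, hcount, hfilter, List.replicate_zero, List.nil_append,
    List.take_of_length_le le_rfl, List.drop_of_length_le le_rfl, List.append_nil]

theorem grav_zero (c : List String) : grav 0 c = c := by
  simp [grav]

-- bubble = rotate the prefix 0..p of column x: the cell at p goes to the top
theorem pvBubble_spec (x p : Nat) (g : List (List String))
    (hp : p < g.length) (hv : ∀ y ≤ p, x < (g.getD y []).length) :
    pvShape g (pvBubble x p g) ∧
    colAt x (pvBubble x p g) =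
      (colAt x g).getD p "" :: ((colAt x g).take p ++ (colAt x g).drop (p + 1)) ∧
    ∀ x', x' ≠ x → colAt x' (pvBubble x p g) = colAt x' g := by
  induction p generalizing g with
  | zero =>
    have hb0 : pvBubble x 0 g = g := rfl
    refine ⟨pvShape_refl g, ?_, fun _ _ => by rw [hb0]⟩
    rw [hb0]
    have hlen : (colAt x g).length = g.length := length_colAt x g
    cases hc : colAt x g with
    | nil => rw [hc] at hlen; simp at hlen; omega
    | cons a t => simp [hc]
  | succ p ih =>
    have hyp : p < g.length := by omega
    have hx1 : x < (g.getD (p+1) []).length := hv (p+1) le_rfl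
    have hxp : x < (g.getD p []).length := hv p (by omega)
    set a := pvGet g p x with ha
    set b := pvGet g (p+1) x with hb
    set g1 := pvSet g (p+1) x a with hg1
    set g2 := pvSet g1 p x b with hg2
    have hstep : pvBubble x (p+1) g = pvBubble x p g2 := by
      rw [pvBubble]
    have hs1 : pvShape g g1 := pvShape_pvSet g (p+1) x a
    have hs2 : pvShape g g2 := pvShape_trans hs1 (pvShape_pvSet g1 p x b)
    have hc1 : colAt x g1 = (colAt x g).set (p+1) a :=
      colAt_pvSet_self g (p+1) x a hp hx1
    have hc2 : colAt x g2 = ((colAt x g).set (p+1) a).set p b := by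
      rw [hg2, colAt_pvSet_self g1 p x b (by rw [hs1.1]; omega) (by rw [hs1.2 p]; exact hxp), hc1]
    have hp2 : p < g2.length := by rw [hs2.1]; omega
    have hv2 : ∀ y ≤ p, x < (g2.getD y []).length := by
      intro y hy
      rw [hs2.2 y]
      exact hv y (by omega)
    obtain ⟨ihs, ihc, ihn⟩ := ih g2 hp2 hv2
    refine ⟨pvShape_trans hs2 ihs, ?_, ?_⟩
    · rw [hstep, ihc, hc2]
      set c := colAt x g with hcdef
      have hlc : c.length = g.length := length_colAt x g
      have hpc : p < c.length := by omega
      have hp1c : p + 1 < c.length := by omega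
      have hga : a = c.getD p "" := by rw [ha, ← getD_colAt]
      have hgb : b = c.getD (p+1) "" := by rw [hb, ← getD_colAt]
      have e1 : ((c.set (p+1) a).set p b).getD p "" = b := by
        rw [List.getD_eq_getElem?_getD, List.getElem?_set]
        simp [hpc]
      have e2 : ((c.set (p+1) a).set p b).take p = c.take p := by
        rw [List.take_set_of_le (le_refl p), List.take_set_of_le (by omega)]
      have e3 : ((c.set (p+1) a).set p b).drop (p+1) = a :: c.drop (p+2) := by
        rw [List.drop_set_of_lt (by omega)]
        have hlen' : p + 1 < (c.set (p+1) a).length := by simpa using hp1c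
        obtain ⟨_, hdrop⟩ := take_elem_drop (p+1) (c.set (p+1) a) hlen'
        rw [hdrop]
        congr 1
        · rw [List.getD_eq_getElem?_getD, List.getElem?_set]
          simp [hp1c]
        · rw [List.drop_set_of_lt (by omega)]
      obtain ⟨htake, _⟩ := take_elem_drop p c hpc
      rw [e1, e2, e3, hgb, htake, hga]
      simp
    · intro x' hx'
      rw [hstep, ihn x' hx', hg2, colAt_pvSet_ne, hg1, colAt_pvSet_ne] <;> exact hx'

-- the inner loop of A over row k, seen per column
theorem pvProcessRow_spec (g P : List (List String)) (k : Nat)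
    (hpre : Pre_drop_jewels g) (hshape : pvShape g P)
    (hcols : ∀ x, colAt x P = grav k (colAt x g)) (hk : k < g.length) :
    pvShape g (pvProcessRow P k) ∧
    ∀ x, colAt x (pvProcessRow P k) = grav (k + 1) (colAt x g) := by
  have hrl : (P.getD k []).length = (g.getD k []).length := hshape.2 k
  have main : ∀ j, j ≤ (g.getD k []).length →
      pvShape g ((List.range j).foldl (fun g' x => pvRowStep g' k x) P) ∧
      (∀ x, x < j → colAt x ((List.range j).foldl (fun g' x => pvRowStep g' k x) P)
          = grav (k + 1) (colAt x g)) ∧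
      (∀ x, ¬ x < j → colAt x ((List.range j).foldl (fun g' x => pvRowStep g' k x) P)
          = grav k (colAt x g)) := by
    intro j
    induction j with
    | zero =>
      intro _
      exact ⟨hshape, fun x hx => absurd hx (by omega), fun x _ => hcols x⟩
    | succ n ih =>
      intro hn
      obtain ⟨ws, wc, wo⟩ := ih (by omega)
      rw [List.range_succ, List.foldl_append, List.foldl_cons, List.foldl_nil]
      set Q := (List.range n).foldl (fun g' x => pvRowStep g' k x) P with hQ
      have hcell : pvGet Q k n = (colAt n g).getD k "" := by
        rw [← getD_colAt, wo n (by omega), getD_grav_ge k k _ le_rfl]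
      have hkc : k < (colAt n g).length := by rw [length_colAt]; omega
      by_cases hsp : (colAt n g).getD k "" = " "
      · have hgcell : (g.getD k []).getD n "" = " " := by
          rw [← hsp, getD_colAt]; rfl
        by_cases hk0 : 0 < k
        · have hvQ : ∀ y ≤ k, n < (Q.getD y []).length := by
            intro y hy
            rw [ws.2 y]
            rcases Nat.lt_or_ge y k with hy' | hy'
            · exact hpre k hk n (by omega) hgcell y hy'
            · have : y = k := by omega
              subst this; omega
          have hsp' : (getElem? (colAt n g) k).getD "" = " " := by
            rwa [List.getD_eq_getElem?_getD] at hsp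
          have hres : pvRowStep Q k n = pvBubble n k Q := by
            rw [pvRowStep, hcell]
            simp [hsp', hk0]
          obtain ⟨bs, bc, bn⟩ := pvBubble_spec n k Q (by rw [ws.1]; omega) hvQ
          rw [hres]
          refine ⟨pvShape_trans ws bs, ?_, ?_⟩
          · intro x hx
            rcases Nat.lt_or_ge x n with hx' | hx'
            · rw [bn x (by omega), wc x hx']
            · have hxn : x = n := by omega
              subst hxn
              rw [bc, wo x (by omega), ← grav_succ_space k _ hkc hsp]
          · intro x hx
            rw [bn x (by omega), wo x (by omega)]
        · have hk0' : k = 0 := by omega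
          have hsp' : (getElem? (colAt n g) k).getD "" = " " := by
            rwa [List.getD_eq_getElem?_getD] at hsp
          have hres : pvRowStep Q k n = Q := by
            rw [pvRowStep, hcell]
            simp [hsp', hk0]
          rw [hres]
          refine ⟨ws, ?_, ?_⟩
          · intro x hx
            rcases Nat.lt_or_ge x n with hx' | hx'
            · exact wc x hx'
            · have hxn : x = n := by omega
              subst hxn
              subst hk0'
              rw [wo x (by omega), grav_zero, grav_one_space _ hsp]
          · intro x hx
            exact wo x (by omega)
      · have hsp' : ¬ (getElem? (colAt n g) k).getD "" = " " := by
          rwa [List.getD_eq_getElem?_getD] at hsp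
        have hres : pvRowStep Q k n = Q := by
          rw [pvRowStep, hcell]
          simp [hsp']
        rw [hres]
        refine ⟨ws, ?_, ?_⟩
        · intro x hx
          rcases Nat.lt_or_ge x n with hx' | hx'
          · exact wc x hx'
          · have hxn : x = n := by omega
            subst hxn
            rw [wo x (by omega), grav_succ_nonspace k _ hsp]
        · intro x hx
          exact wo x (by omega)
  obtain ⟨ms, mc, mo⟩ := main (g.getD k []).length le_rfl
  have hunf : pvProcessRow P k
      = (List.range (g.getD k []).length).foldl (fun g' x => pvRowStep g' k x) P := by
    rw [pvProcessRow, hrl]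
  rw [hunf]
  refine ⟨ms, ?_⟩
  intro x
  rcases Nat.lt_or_ge x (g.getD k []).length with hx | hx
  · exact mc x hx
  · rw [mo x (by omega)]
    have hcell0 : (colAt x g).getD k "" ≠ " " := by
      rw [getD_colAt]
      show (g.getD k []).getD x "" ≠ " "
      rw [List.getD_eq_getElem?_getD, List.getElem?_eq_none (by omega)]
      decide
    rw [grav_succ_nonspace k _ hcell0]

-- A-side invariant: after the outer loop has processed rows < k, each column reads grav k
theorem drop_jewels_invariant (g : List (List String)) (hpre : Pre_drop_jewels g)
    (k : Nat) (hk : k ≤ g.length) :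
    pvShape g ((List.range k).foldl pvProcessRow g) ∧
    ∀ x, colAt x ((List.range k).foldl pvProcessRow g) = grav k (colAt x g) := by
  induction k with
  | zero => exact ⟨pvShape_refl g, fun x => (grav_zero (colAt x g)).symm⟩
  | succ n ih =>
    obtain ⟨ihs, ihc⟩ := ih (by omega)
    rw [List.range_succ, List.foldl_append, List.foldl_cons, List.foldl_nil]
    exact pvProcessRow_spec g _ n hpre ihs ihc (by omega)

-- a cell reads " " iff the guarded condition of B's search holds at it
theorem cond_iff_space (g : List (List String)) (x y : Nat) :
    (x < (g.getD y []).length ∧ (g.getD y []).getD x "" = " ")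
      ↔ (colAt x g).getD y "" = " " := by
  rw [getD_colAt]
  show _ ↔ pvGet g y x = " "
  rw [pvGet]
  constructor
  · exact fun h => h.2
  · intro h
    refine ⟨?_, h⟩
    by_contra hx
    rw [List.getD_eq_getElem?_getD, List.getElem?_eq_none (by omega)] at h
    simp at h

-- pvFindLowest finds the last space of the column (padded cells "" are never " ")
theorem pvFindLowest_spec (g : List (List String)) (x : Nat) :
    (pvFindLowest g x = none → ∀ y < g.length, (colAt x g).getD y "" ≠ " ") ∧
    (∀ lo, pvFindLowest g x = some lo →
      lo < g.length ∧ (colAt x g).getD lo "" = " " ∧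
        ∀ y, lo < y → y < g.length → (colAt x g).getD y "" ≠ " ") := by
  have aux : ∀ n,
      ((List.range n).foldl
        (fun acc y => if x < (g.getD y []).length ∧ (g.getD y []).getD x "" = " " then some y else acc)
        none = none → ∀ y < n, (colAt x g).getD y "" ≠ " ") ∧
      (∀ lo, (List.range n).foldl
        (fun acc y => if x < (g.getD y []).length ∧ (g.getD y []).getD x "" = " " then some y else acc)
        none = some lo →
        lo < n ∧ (colAt x g).getD lo "" = " " ∧
          ∀ y, lo < y → y < n → (colAt x g).getD y "" ≠ " ") := by
    intro n
    induction n with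
    | zero => exact ⟨fun _ y hy => absurd hy (by omega), fun lo h => by simp at h⟩
    | succ m ih =>
      rw [List.range_succ, List.foldl_append, List.foldl_cons, List.foldl_nil]
      by_cases hc : x < (g.getD m []).length ∧ (g.getD m []).getD x "" = " "
      · rw [if_pos hc]
        refine ⟨fun h => by simp at h, ?_⟩
        intro lo h
        have hlo : lo = m := by injection h with h'; omega
        subst hlo
        exact ⟨by omega, (cond_iff_space g x lo).mp hc, fun y hy1 hy2 => by omega⟩
      · rw [if_neg hc]
        obtain ⟨ihn, ihs⟩ := ih
        refine ⟨?_, ?_⟩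
        · intro h y hy
          rcases Nat.lt_or_ge y m with hy' | hy'
          · exact ihn h y hy'
          · have : y = m := by omega
            subst this
            exact fun hsp => hc ((cond_iff_space g x y).mpr hsp)
        · intro lo h
          obtain ⟨h1, h2, h3⟩ := ihs lo h
          refine ⟨by omega, h2, ?_⟩
          intro y hy1 hy2
          rcases Nat.lt_or_ge y m with hy' | hy'
          · exact h3 y hy1 hy'
          · have : y = m := by omega
            subst this
            exact fun hsp => hc ((cond_iff_space g x y).mpr hsp)
  exact aux g.length

-- every row length is bounded by the fold of Nat.max that B computes as the width
theorem nat_le_foldl_max (l : List Nat) (a : Nat) (h : a ∈ l) : a ≤ l.foldl Nat.max 0 := by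
  have aux : ∀ (l : List Nat) (init : Nat), (∀ b ∈ l, b ≤ l.foldl Nat.max init) ∧ init ≤ l.foldl Nat.max init := by
    intro l
    induction l with
    | nil => intro init; exact ⟨by simp, by simp⟩
    | cons c t ih =>
      intro init
      obtain ⟨h1, h2⟩ := ih (Nat.max init c)
      refine ⟨?_, ?_⟩
      · intro b hb
        rcases List.mem_cons.mp hb with rfl | hb'
        · calc b ≤ Nat.max init b := Nat.le_max_right _ _
            _ ≤ _ := by simpa using h2
        · simpa using h1 b hb'
      · calc init ≤ Nat.max init c := Nat.le_max_left _ _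
          _ ≤ _ := by simpa using h2
  exact (aux l 0).1 a h

-- [c[y] for y in range(m)] is the prefix of the column
theorem map_range_getD (c : List String) (m : Nat) (hm : m ≤ c.length) :
    (List.range m).map (fun y => c.getD y "") = c.take m := by
  induction m with
  | zero => simp
  | succ n ih =>
    rw [List.range_succ, List.map_append, ih (by omega), List.map_cons, List.map_nil]
    exact ((take_elem_drop n c (by omega)).1).symm

-- setting the cell just after a prefix of known length
theorem set_append_cons (l1 l2 : List String) (a v : String) (k : Nat) (hk : k = l1.length) :
    (l1 ++ a :: l2).set k v = l1 ++ v :: l2 := by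
  subst hk
  rw [List.set_append]
  simp

-- the write-back loop overwrites the first m cells of column x with w
theorem foldl_pvSet_spec (g' : List (List String)) (x m : Nat) (w : List String)
    (hm : m ≤ g'.length) (hw : m ≤ w.length)
    (hv : ∀ y < m, x < (g'.getD y []).length) :
    pvShape g' ((List.range m).foldl (fun h y => pvSet h y x (w.getD y "")) g') ∧
    colAt x ((List.range m).foldl (fun h y => pvSet h y x (w.getD y "")) g')
      = w.take m ++ (colAt x g').drop m ∧
    ∀ x', x' ≠ x →
      colAt x' ((List.range m).foldl (fun h y => pvSet h y x (w.getD y "")) g') = colAt x' g' := by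
  induction m with
  | zero => exact ⟨pvShape_refl g', by simp, fun _ _ => rfl⟩
  | succ n ih =>
    obtain ⟨ws, wcol, wother⟩ := ih (by omega) (by omega) (fun y hy => hv y (by omega))
    rw [List.range_succ, List.foldl_append, List.foldl_cons, List.foldl_nil]
    set Q := (List.range n).foldl (fun h y => pvSet h y x (w.getD y "")) g' with hQ
    have hnQ : n < Q.length := by rw [ws.1]; omega
    have hxQ : x < (Q.getD n []).length := by rw [ws.2 n]; exact hv n (by omega)
    refine ⟨pvShape_trans ws (pvShape_pvSet Q n x (w.getD n "")), ?_, ?_⟩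
    · rw [colAt_pvSet_self Q n x _ hnQ hxQ, wcol]
      have hlc : (colAt x g').length = g'.length := length_colAt x g'
      obtain ⟨_, hdrop⟩ := take_elem_drop n (colAt x g') (by omega)
      obtain ⟨htw, _⟩ := take_elem_drop n w (by omega)
      have hlen : (w.take n).length = n := by simp; omega
      rw [hdrop, set_append_cons _ _ _ _ n hlen.symm, htw]
      simp
    · intro x' hx'
      rw [colAt_pvSet_ne Q n x x' _ hx', wother x' hx']

-- the closed column form, cut at the lowest space: empties, then solids, then the untouched rest
theorem grav_full_last_space (c : List String) (lo : Nat) (hlo : lo < c.length)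
    (hsp : c.getD lo "" = " ")
    (haft : ∀ y, lo < y → y < c.length → c.getD y "" ≠ " ") :
    grav c.length c =
      (List.replicate (lo + 1 - ((c.take (lo + 1)).filter (fun s => s ≠ " ")).length) " "
        ++ (c.take (lo + 1)).filter (fun s => s ≠ " ")) ++ c.drop (lo + 1) := by
  have hnosp : ∀ s ∈ c.drop (lo + 1), s ≠ " " := by
    intro s hs
    obtain ⟨i, hi, rfl⟩ := List.mem_iff_getElem.mp hs
    rw [List.getElem_drop]
    have hidx : lo + 1 + i < c.length := by
      have := List.length_drop (l := c) (i := lo + 1)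
      omega
    have := haft (lo + 1 + i) (by omega) hidx
    rwa [List.getD_eq_getElem?_getD, List.getElem?_eq_getElem hidx] at this
  have hcnt : (c.drop (lo + 1)).count " " = 0 := by
    rw [List.count_eq_zero]
    intro hmem
    exact hnosp _ hmem rfl
  have hfil : (c.drop (lo + 1)).filter (fun s => s ≠ " ") = c.drop (lo + 1) := by
    rw [List.filter_eq_self]
    intro a ha
    simpa using hnosp a ha
  have hRF := length_RF (lo + 1) c
  have hlt : (c.take (lo + 1)).length = lo + 1 := by simp; omega
  have htk : c.take c.length = c := List.take_of_length_le le_rfl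
  have hdr : c.drop c.length = [] := List.drop_of_length_le le_rfl
  have hcount : c.count " "
      = lo + 1 - ((c.take (lo + 1)).filter (fun s => s ≠ " ")).length := by
    conv_lhs => rw [← List.take_append_drop (lo + 1) c]
    rw [List.count_append, hcnt]
    omega
  have hfilc : c.filter (fun s => s ≠ " ")
      = (c.take (lo + 1)).filter (fun s => s ≠ " ") ++ c.drop (lo + 1) := by
    conv_lhs => rw [← List.take_append_drop (lo + 1) c]
    rw [List.filter_append, hfil]
  rw [grav, htk, hdr, hcount, hfilc]
  simp [List.append_assoc]

-- one column step of B produces the fully settled column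
theorem pvColStep_spec (g g' : List (List String)) (x : Nat)
    (hpre : Pre_drop_jewels g) (hshape : pvShape g g') (hcol : colAt x g' = colAt x g) :
    pvShape g (pvColStep g' x) ∧
    colAt x (pvColStep g' x) = grav g.length (colAt x g) ∧
    ∀ x', x' ≠ x → colAt x' (pvColStep g' x) = colAt x' g' := by
  have hlc : (colAt x g).length = g.length := length_colAt x g
  have hgl : g'.length = g.length := hshape.1
  obtain ⟨hfn, hfs⟩ := pvFindLowest_spec g' x
  cases hfl : pvFindLowest g' x with
  | none =>
    have hns : ∀ y < g.length, (colAt x g).getD y "" ≠ " " := by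
      intro y hy
      rw [← hcol]
      exact hfn hfl y (by omega)
    have : grav g.length (colAt x g) = colAt x g := by
      have := grav_eq_self_of_no_space (colAt x g) (by rw [hlc]; exact hns)
      rwa [hlc] at this
    rw [pvColStep, hfl, this]
    exact ⟨hshape, hcol, fun _ _ => rfl⟩
  | some lo =>
    obtain ⟨hlo, hsp, haft⟩ := hfs lo hfl
    rw [hcol] at hsp haft
    have hlo' : lo < g.length := by omega
    have hxlo : x < (g.getD lo []).length := ((cond_iff_space g x lo).mpr hsp).1
    have hsp2 : (g.getD lo []).getD x "" = " " := by
      have h' := hsp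
      rw [getD_colAt] at h'
      exact h'
    have hvald : ∀ y < lo + 1, x < (g'.getD y []).length := by
      intro y hy
      rw [hshape.2 y]
      rcases Nat.lt_or_ge y lo with hy' | hy'
      · exact hpre lo hlo' x hxlo hsp2 y hy'
      · have : y = lo := by omega
        subst this
        exact hxlo
    have hcolmap : (List.range (lo + 1)).map (fun y => pvGet g' y x) = (colAt x g).take (lo + 1) := by
      have : (List.range (lo + 1)).map (fun y => pvGet g' y x)
          = (List.range (lo + 1)).map (fun y => (colAt x g).getD y "") := by
        apply List.map_congr_left
        intro y _
        rw [← hcol, getD_colAt]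
      rw [this, map_range_getD _ _ (by omega)]
    rw [pvColStep, hfl]
    simp only [hcolmap]
    set solid := ((colAt x g).take (lo + 1)).filter (fun c => c ≠ " ") with hsolid
    set newcol := List.replicate (lo + 1 - solid.length) " " ++ solid with hnewcol
    have hsl : solid.length ≤ lo + 1 := by
      calc solid.length ≤ ((colAt x g).take (lo + 1)).length := List.length_filter_le _ _
        _ ≤ lo + 1 := by simp
    have hnl : newcol.length = lo + 1 := by
      rw [hnewcol]
      simp only [List.length_append, List.length_replicate]
      omega
    obtain ⟨fs, fcol, fother⟩ := foldl_pvSet_spec g' x (lo + 1) newcol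
      (by omega) (by omega) hvald
    refine ⟨pvShape_trans hshape fs, ?_, fother⟩
    rw [fcol, hcol, List.take_of_length_le (by omega)]
    have := grav_full_last_space (colAt x g) lo (by omega) hsp
      (by intro y h1 h2; exact haft y h1 (by omega))
    rw [hlc] at this
    rw [this, hnewcol, hsolid]

-- B-side invariant: after processing columns < j, those columns read grav (full height)
theorem drop_jewels_alt_invariant (g : List (List String)) (hpre : Pre_drop_jewels g)
    (j : Nat) :
    pvShape g ((List.range j).foldl pvColStep g) ∧
    (∀ x, x < j → colAt x ((List.range j).foldl pvColStep g) = grav g.length (colAt x g)) ∧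
    (∀ x, ¬ x < j → colAt x ((List.range j).foldl pvColStep g) = colAt x g) := by
  induction j with
  | zero => exact ⟨pvShape_refl g, fun x hx => absurd hx (by omega), fun _ _ => rfl⟩
  | succ n ih =>
    obtain ⟨ws, wc, wo⟩ := ih
    rw [List.range_succ, List.foldl_append, List.foldl_cons, List.foldl_nil]
    obtain ⟨cs, ccol, cother⟩ := pvColStep_spec g _ n hpre ws (wo n (by omega))
    refine ⟨cs, ?_, ?_⟩
    · intro x hx
      rcases Nat.lt_or_ge x n with hx' | hx'
      · rw [cother x (by omega), wc x hx']
      · have : x = n := by omega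
        subst this
        exact ccol
    · intro x hx
      rw [cother x (by omega), wo x (by omega)]

-- two grids with the same shape and the same columns are equal
theorem pvGridExt (g g' g'' : List (List String)) (h1 : pvShape g g') (h2 : pvShape g g'')
    (hc : ∀ x, colAt x g' = colAt x g'') : g' = g'' := by
  have hget : ∀ y x, (g'.getD y []).getD x "" = (g''.getD y []).getD x "" := by
    intro y x
    have h := congrArg (fun c => c.getD y "") (hc x)
    simp only [getD_colAt] at h
    exact h
  apply List.ext_getElem?
  intro y
  by_cases hy : y < g'.length
  · have hy'' : y < g''.length := by have := h1.1; have := h2.1; omega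
    rw [List.getElem?_eq_getElem hy, List.getElem?_eq_getElem hy'']
    congr 1
    have hr' : g'[y] = g'.getD y [] := by
      rw [List.getD_eq_getElem?_getD, List.getElem?_eq_getElem hy]; rfl
    have hr'' : g''[y] = g''.getD y [] := by
      rw [List.getD_eq_getElem?_getD, List.getElem?_eq_getElem hy'']; rfl
    rw [hr', hr'']
    have hrl : (g'.getD y []).length = (g''.getD y []).length := (h1.2 y).trans (h2.2 y).symm
    apply List.ext_getElem?
    intro x
    by_cases hx : x < (g'.getD y []).length
    · have hx'' : x < (g''.getD y []).length := by omega
      rw [List.getElem?_eq_getElem hx, List.getElem?_eq_getElem hx'']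
      congr 1
      have hxg := hget y x
      set r1 := g'.getD y [] with hr1
      set r2 := g''.getD y [] with hr2
      rw [List.getD_eq_getElem?_getD, List.getD_eq_getElem?_getD,
        List.getElem?_eq_getElem hx, List.getElem?_eq_getElem hx''] at hxg
      simpa using hxg
    · rw [List.getElem?_eq_none (by omega), List.getElem?_eq_none (by omega)]
  · have hy'' : ¬ y < g''.length := by have := h1.1; have := h2.1; omega
    rw [List.getElem?_eq_none (by omega), List.getElem?_eq_none (by omega)]

-- ===== VERDICT (by name: the statement is the Claim_ definition above) =====
theorem drop_jewels_spec : Claim_equal_drop_jewels := by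
  unfold Claim_equal_drop_jewels
  intro g _ hpre
  unfold Spec_drop_jewels
  obtain ⟨as_, ac⟩ := drop_jewels_invariant g hpre g.length le_rfl
  set width := (g.map List.length).foldl Nat.max 0 with hwidth
  obtain ⟨bs, bc, bo⟩ := drop_jewels_alt_invariant g hpre width
  have hrowle : ∀ y < g.length, (g.getD y []).length ≤ width := by
    intro y hy
    apply nat_le_foldl_max
    apply List.mem_map_of_mem
    rw [List.getD_eq_getElem?_getD, List.getElem?_eq_getElem hy]
    exact List.getElem_mem hy
  have hA : drop_jewels g = (List.range g.length).foldl pvProcessRow g := rfl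
  have hB : drop_jewels_alt g = (List.range width).foldl pvColStep g := rfl
  rw [hA, hB]
  apply pvGridExt g _ _ as_ bs
  intro x
  rw [ac x]
  rcases Nat.lt_or_ge x width with hx | hx
  · rw [bc x hx]
  · rw [bo x (by omega)]
    have hns : ∀ y < (colAt x g).length, (colAt x g).getD y "" ≠ " " := by
      intro y hy
      rw [length_colAt] at hy
      rw [getD_colAt]
      show ¬ pvGet g y x = " "
      rw [pvGet, List.getD_eq_getElem?_getD,
        List.getElem?_eq_none (by have := hrowle y hy; omega)]
      decide
    have := grav_eq_self_of_no_space (colAt x g) hns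
    rw [length_colAt] at this
    rw [this]
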